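-- pv_equiv track=rewrite | github.com/jorruior/evochat | formatter.py | format_xrefs
-- ===== SOURCE A (Python) =====
-- from typing import Optional
--
-- def format_xrefs(gene: str, xrefs: list, db_filter: Optional[str] = None) -> str:
--     if not xrefs:
--         return f"  No cross-references found for {gene}."
--
--     by_db = {}
--     for x in xrefs:
--         db = x.get("dbname", "unknown")
--         by_db.setdefault(db, []).append(x)
--
--     lines = [f"  Cross-references for {gene}:", f""]
--     for db, entries in sorted(by_db.items()):
--         ids = sorted({e.get("primary_id", "?") for e in entries})
--         lines.append(f"  {db}:")
--         for pid in ids: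
--             lines.append(f"    {pid}")
--         lines.append(f"")
--
--     return "\n".join(lines)
-- ===== SOURCE B (Python) =====
-- from typing import Optional
--
-- def format_xrefs(gene: str, xrefs: list, db_filter: Optional[str] = None) -> str:
--     if not xrefs:
--         return f"  No cross-references found for {gene}."
--
--     dbs = sorted({x.get("dbname", "unknown") for x in xrefs})
--     lines = [f"  Cross-references for {gene}:", ""]
--     for db in dbs:
--         lines.append(f"  {db}:")
--         ids = sorted({x.get("primary_id", "?") for x in xrefs
--                       if x.get("dbname", "unknown") == db})
--         lines.extend(f"    {pid}" for pid in ids)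
--         lines.append("")
--     return "\n".join(lines)
-- ===== Notes on version B (the rewrite author's own statement) =====
-- stated objective: alternative
-- what changed: B drops A's dict-of-lists grouping entirely: it sorts the distinct dbnames once and then rescans xrefs per db, collecting and sorting that db's distinct primary_ids directly.
import Mathlib
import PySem

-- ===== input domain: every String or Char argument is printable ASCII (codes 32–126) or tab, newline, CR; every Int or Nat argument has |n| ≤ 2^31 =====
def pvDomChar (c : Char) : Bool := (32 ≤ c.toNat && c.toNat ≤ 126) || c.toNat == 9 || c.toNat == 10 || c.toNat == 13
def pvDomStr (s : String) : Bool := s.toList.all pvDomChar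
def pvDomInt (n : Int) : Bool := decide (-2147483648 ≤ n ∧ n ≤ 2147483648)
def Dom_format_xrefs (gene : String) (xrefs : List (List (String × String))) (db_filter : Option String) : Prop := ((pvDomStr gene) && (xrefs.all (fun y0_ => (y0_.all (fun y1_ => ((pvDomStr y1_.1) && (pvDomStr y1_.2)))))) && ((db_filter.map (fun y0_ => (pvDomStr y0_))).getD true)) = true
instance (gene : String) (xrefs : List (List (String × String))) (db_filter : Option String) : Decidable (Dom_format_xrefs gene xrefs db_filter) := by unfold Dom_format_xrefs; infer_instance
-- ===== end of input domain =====

-- B replaces A's dict-of-lists grouping by a sorted list of distinct dbnames and a per-db rescan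
-- of xrefs (no dict at all); same return value. No side effects in either version; db_filter is
-- unused by the original A and by B alike.

-- x.get(k, dflt) on an xref record (a Python dict, modelled as an association list; first match wins)
def pyGetStr (x : List (String × String)) (k dflt : String) : String :=
  PySem.Dict.getD (PySem.Dict.mk x) k dflt

-- ===== PORT A =====
-- sorted(by_db.items()) compares (key, value) tuples; since dict keys are distinct, Python never
-- examines the value component, so it is ported exactly as a sort by the key (first component).
def format_xrefs (gene : String) (xrefs : List (List (String × String))) (db_filter : Option String) : String :=
  if xrefs = [] then
    "  No cross-references found for " ++ gene ++ "."
  else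
    let by_db : PySem.Dict String (List (List (String × String))) :=
      xrefs.foldl (fun d x => d.modify (pyGetStr x "dbname" "unknown") [] (· ++ [x])) PySem.Dict.empty
    let lines : List String := ["  Cross-references for " ++ gene ++ ":", ""]
    let lines :=
      (PySem.List.sorted by_db.items (fun p => p.1)).foldl
        (fun lines p =>
          let ids := PySem.List.sorted
            (PySem.Set.ofList (p.2.map (fun e => pyGetStr e "primary_id" "?"))) (fun s => s)
          let lines := lines ++ ["  " ++ p.1 ++ ":"]
          let lines := ids.foldl (fun ls pid => ls ++ ["    " ++ pid]) lines
          lines ++ [""]) lines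
    PySem.Str.join "\n" lines

-- ===== PORT B =====
def format_xrefs_alt (gene : String) (xrefs : List (List (String × String))) (db_filter : Option String) : String :=
  if xrefs = [] then
    "  No cross-references found for " ++ gene ++ "."
  else
    let dbs := PySem.List.sorted
      (PySem.Set.ofList (xrefs.map (fun x => pyGetStr x "dbname" "unknown"))) (fun s => s)
    let lines :=
      dbs.foldl
        (fun ls db =>
          let ids := PySem.List.sorted
            (PySem.Set.ofList ((xrefs.filter (fun x => pyGetStr x "dbname" "unknown" == db)).map
              (fun x => pyGetStr x "primary_id" "?"))) (fun s => s)
          ls ++ ["  " ++ db ++ ":"] ++ ids.map (fun pid => "    " ++ pid) ++ [""])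
        ["  Cross-references for " ++ gene ++ ":", ""]
    PySem.Str.join "\n" lines

-- ===== PRECONDITION & SPEC =====
def Spec_format_xrefs (gene : String) (xrefs : List (List (String × String))) (db_filter : Option String) (out : String) : Prop := out = format_xrefs_alt gene xrefs db_filter
instance (gene : String) (xrefs : List (List (String × String))) (db_filter : Option String) (out : String) : Decidable (Spec_format_xrefs gene xrefs db_filter out) := by unfold Spec_format_xrefs; infer_instance

-- ===== CLAIM (what is proved, stated in full; the proofs are below) =====
def Claim_equal_format_xrefs : Prop := ∀ (gene : String) (xrefs : List (List (String × String))) (db_filter : Option String), Dom_format_xrefs gene xrefs db_filter → Spec_format_xrefs gene xrefs db_filter (format_xrefs gene xrefs db_filter)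

-- ===== LEMMAS AND PROOFS =====

lemma flatten_map_singleton {α β : Type} (f : α → β) (l : List α) :
    (l.map (fun x => [f x])).flatten = l.map f := by
  induction l with
  | nil => rfl
  | cons a t ih => simp [ih]

-- A's grouping loop, named for the proofs
def groupByDb (xrefs : List (List (String × String))) : PySem.Dict String (List (List (String × String))) :=
  xrefs.foldl (fun d x => d.modify (pyGetStr x "dbname" "unknown") [] (· ++ [x])) PySem.Dict.empty

lemma groupByDb_keys (xrefs : List (List (String × String))) :
    (groupByDb xrefs).keys = PySem.Set.ofList (xrefs.map (fun x => pyGetStr x "dbname" "unknown")) := by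
  have h := PySem.Dict.keys_foldl_modify_key xrefs (fun x => pyGetStr x "dbname" "unknown")
    ([] : List (List (String × String))) (fun _ x => (· ++ [x])) PySem.Dict.empty
  simpa [groupByDb, PySem.Set.update, PySem.Set.ofList_eq_foldl] using h

lemma groupByDb_keys_nodup (xrefs : List (List (String × String))) :
    (groupByDb xrefs).keys.Nodup := by
  rw [groupByDb_keys]; exact PySem.Set.nodup_ofList _

lemma groupByDb_getD (xrefs : List (List (String × String))) (db : String) :
    (groupByDb xrefs).getD db [] = xrefs.filter (fun x => pyGetStr x "dbname" "unknown" == db) := by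
  have hfold : groupByDb xrefs =
      (xrefs.map (fun x => (pyGetStr x "dbname" "unknown", x))).foldl
        (fun d p => d.modify p.1 [] (· ++ [p.2])) PySem.Dict.empty := by
    rw [List.foldl_map]; rfl
  rw [hfold, PySem.Dict.getD_foldl_modify_append, List.filter_map]
  simp [Function.comp_def, List.map_map]

lemma groupByDb_items (xrefs : List (List (String × String))) :
    (groupByDb xrefs).items =
      (PySem.Set.ofList (xrefs.map (fun x => pyGetStr x "dbname" "unknown"))).map
        (fun db => (db, xrefs.filter (fun x => pyGetStr x "dbname" "unknown" == db))) := by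
  rw [PySem.Dict.items_eq_map_keys (groupByDb xrefs) (groupByDb_keys_nodup xrefs) [],
    groupByDb_keys]
  exact List.map_congr_left (fun k _ => by rw [groupByDb_getD])

lemma sorted_items_groupByDb (xrefs : List (List (String × String))) :
    PySem.List.sorted (groupByDb xrefs).items (fun p => p.1) =
      (PySem.List.sorted
        (PySem.Set.ofList (xrefs.map (fun x => pyGetStr x "dbname" "unknown"))) (fun s => s)).map
        (fun db => (db, xrefs.filter (fun x => pyGetStr x "dbname" "unknown" == db))) := by
  set S := PySem.Set.ofList (xrefs.map (fun x => pyGetStr x "dbname" "unknown")) with hS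
  set g := fun db => (db, xrefs.filter (fun x => pyGetStr x "dbname" "unknown" == db)) with hg
  rw [groupByDb_items]
  apply PySem.List.sorted_eq_of_perm_of_pairwise_lt
  · exact ((PySem.List.sorted_perm S (fun s => s) false)).map g
  · have hp := PySem.List.sorted_ofList_pairwise_lt (xrefs.map (fun x => pyGetStr x "dbname" "unknown"))
    rw [← hS] at hp
    exact hp.map g (fun a b hab => hab)

-- ===== VERDICT (by name: the statement is the Claim_ definition above) =====
theorem format_xrefs_spec : Claim_equal_format_xrefs := by
  intro gene xrefs db_filter _
  show format_xrefs gene xrefs db_filter = format_xrefs_alt gene xrefs db_filter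
  unfold format_xrefs format_xrefs_alt
  by_cases h : xrefs = []
  · simp [h]
  · simp only [h]
    congr 1
    rw [show (xrefs.foldl (fun d x => d.modify (pyGetStr x "dbname" "unknown") [] (· ++ [x]))
      PySem.Dict.empty) = groupByDb xrefs from rfl]
    rw [sorted_items_groupByDb, List.foldl_map]
    refine congrArg _ (PySem.List.foldl_congr_mem _ _ _ _ ?_)
    intro ls db _
    simp [List.append_assoc, flatten_map_singleton]
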